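-- pv_equiv track=rewrite | github.com/KUNAD/Python_base_GB_1 | Danila_Maksimuk_dz_5/task_3_5.py | check_gen
-- ===== SOURCE A (Python) =====
-- def check_gen(tutors: list, klasses: list):
--     i = 0
--     for code in tutors:
--         if i + 1 > len(klasses):
--             my_cortege = (tutors[i], None)
--             yield(my_cortege)
--         else:
--             my_cortege = (tutors[i], klasses[i])
--             yield(my_cortege)
--         i += 1
-- ===== SOURCE B (Python) =====
-- def check_gen(tutors: list, klasses: list):
--     padded = list(klasses) + [None] * max(0, len(tutors) - len(klasses))
--     yield from zip(tutors, padded)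
-- ===== Notes on version B (the rewrite author's own statement) =====
-- stated objective: simpler
-- what changed: Replaces the indexed loop with its per-element length comparison by a single zip over klasses padded once with None up to len(tutors); zip's truncation reproduces A's handling of surplus klasses.
import Mathlib
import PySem

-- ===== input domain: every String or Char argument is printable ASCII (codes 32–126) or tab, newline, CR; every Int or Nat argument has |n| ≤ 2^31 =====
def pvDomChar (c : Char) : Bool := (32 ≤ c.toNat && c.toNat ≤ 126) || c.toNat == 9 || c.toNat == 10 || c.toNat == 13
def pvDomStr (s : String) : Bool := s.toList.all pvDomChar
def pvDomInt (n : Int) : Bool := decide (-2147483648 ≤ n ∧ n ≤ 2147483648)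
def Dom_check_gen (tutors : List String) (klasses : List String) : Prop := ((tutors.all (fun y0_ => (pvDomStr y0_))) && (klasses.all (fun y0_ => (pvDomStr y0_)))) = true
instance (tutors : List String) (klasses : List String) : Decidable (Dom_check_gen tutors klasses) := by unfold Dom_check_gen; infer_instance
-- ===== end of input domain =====

-- B pads klasses once with None and zips with tutors, replacing A's indexed loop and per-element length branch (simpler decomposition; return-value equivalence only — A is a generator).


-- ===== PORT A =====
-- Port of A: generator loop with counter i, branch on i+1 > len(klasses), indexed access.
def checkGenGo (tutors : List String) (klasses : List String) : List String → Int → List (String × Option String)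
  | [], _ => []
  | _ :: rest, i =>
    (if i + 1 > (klasses.length : Int) then
       ((PySem.List.pyGet? tutors i).getD "", (none : Option String))
     else
       ((PySem.List.pyGet? tutors i).getD "", PySem.List.pyGet? klasses i))
    :: checkGenGo tutors klasses rest (i + 1)

def check_gen (tutors : List String) (klasses : List String) : List (String × Option String) :=
  checkGenGo tutors klasses tutors 0

-- ===== PORT B =====
-- Port of B: pad klasses once with None up to len(tutors), then zip (simpler: no per-element branch).
def check_gen_alt (tutors : List String) (klasses : List String) : List (String × Option String) :=
  let padded : List (Option String) :=
    klasses.map some ++ List.replicate (max 0 ((tutors.length : Int) - (klasses.length : Int))).toNat none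
  tutors.zip padded

-- ===== PRECONDITION & SPEC =====
def Spec_check_gen (tutors : List String) (klasses : List String) (out : List (String × Option String)) : Prop := out = check_gen_alt tutors klasses
instance (tutors : List String) (klasses : List String) (out : List (String × Option String)) : Decidable (Spec_check_gen tutors klasses out) := by unfold Spec_check_gen; infer_instance

-- ===== CLAIM (what is proved, stated in full; the proofs are below) =====
def Claim_equal_check_gen : Prop := ∀ (tutors : List String) (klasses : List String), Dom_check_gen tutors klasses → Spec_check_gen tutors klasses (check_gen tutors klasses)

-- ===== LEMMAS AND PROOFS =====

-- ===== VERDICT (by name: the statement is the Claim_ definition above) =====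
lemma checkGenGo_eq (tutors klasses : List String) :
    ∀ (rest : List String) (i : Nat), tutors.drop i = rest →
      checkGenGo tutors klasses rest (i : Int) =
        rest.zip ((klasses.map some ++ List.replicate (tutors.length - klasses.length) none).drop i) := by
  intro rest
  induction rest with
  | nil => intro i _; simp [checkGenGo]
  | cons c rs ih =>
    intro i hdrop
    have hi : i < tutors.length := by
      by_contra h
      simp [List.drop_eq_nil_of_le (Nat.le_of_not_lt h)] at hdrop
    have hget : tutors[i] = c := by
      have := List.drop_eq_getElem_cons hi
      rw [hdrop] at this
      exact (List.cons.injEq .. ▸ this).1.symm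
    have hdrop' : tutors.drop (i + 1) = rs := by
      have := List.drop_eq_getElem_cons hi
      rw [hdrop] at this
      exact ((List.cons.injEq .. ▸ this).2).symm
    have hpadlen : i < (klasses.map some ++ List.replicate (tutors.length - klasses.length) (none : Option String)).length := by
      simp; omega
    have hpaddrop := List.drop_eq_getElem_cons hpadlen
    rw [checkGenGo, hpaddrop, List.zip_cons_cons]
    have hfirst : (PySem.List.pyGet? tutors (i : Int)).getD "" = c := by
      simp [PySem.List.pyGet?_natCast, List.getElem?_eq_getElem hi, hget]
    by_cases hk : i < klasses.length
    · have hcond : ¬ ((i : Int) + 1 > (klasses.length : Int)) := by omega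
      have hpadget : (klasses.map some ++ List.replicate (tutors.length - klasses.length) (none : Option String))[i] = some klasses[i] := by
        rw [List.getElem_append_left (by simpa using hk)]
        simp
      rw [if_neg hcond, hfirst, hpadget, PySem.List.pyGet?_natCast, List.getElem?_eq_getElem hk]
      have : ((i : Int) + 1) = ((i + 1 : Nat) : Int) := by push_cast; ring
      rw [this, ih (i + 1) hdrop']
    · have hcond : ((i : Int) + 1 > (klasses.length : Int)) := by omega
      have hpadget : (klasses.map some ++ List.replicate (tutors.length - klasses.length) (none : Option String))[i] = (none : Option String) := by
        rw [List.getElem_append_right (by simpa using Nat.le_of_not_lt hk)]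
        simp
      rw [if_pos hcond, hfirst, hpadget]
      have : ((i : Int) + 1) = ((i + 1 : Nat) : Int) := by push_cast; ring
      rw [this, ih (i + 1) hdrop']

-- ===== VERDICT (by name: the statement is the Claim_ definition above) =====
theorem check_gen_spec : Claim_equal_check_gen := by
  intro tutors klasses _
  unfold Spec_check_gen check_gen check_gen_alt
  have hmax : (max 0 ((tutors.length : Int) - (klasses.length : Int))).toNat = tutors.length - klasses.length := by
    omega
  have h := checkGenGo_eq tutors klasses tutors 0 (by simp)
  simpa [hmax] using h
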